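-- pv_equiv track=rewrite | github.com/cDreyer00/WepAppStore | application.py | GetRepeats
-- ===== SOURCE A (Python) =====
-- def GetRepeats(arr):
--     r = {}
--     for l in arr:
--         if l in r:
--             r[l] += 1
--         else:
--             r[l] = 1
--
--     return list(r.values())
-- ===== SOURCE B (Python) =====
-- def GetRepeats(arr):
--     data = list(arr)
--     out = []
--     while data:
--         rest = [y for y in data[1:] if y != data[0]]
--         out.append(len(data) - len(rest))
--         data = rest
--     return out
-- ===== Notes on version B (the rewrite author's own statement) =====
-- stated objective: alternative
-- what changed: Replaces A's single-pass incrementing hash dict by an iterative partition: each round the head's count is obtained as the length drop when all its occurrences are filtered out of the remaining data, which then shrinks for the next round, so no counting structure is ever maintained.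
import Mathlib
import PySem

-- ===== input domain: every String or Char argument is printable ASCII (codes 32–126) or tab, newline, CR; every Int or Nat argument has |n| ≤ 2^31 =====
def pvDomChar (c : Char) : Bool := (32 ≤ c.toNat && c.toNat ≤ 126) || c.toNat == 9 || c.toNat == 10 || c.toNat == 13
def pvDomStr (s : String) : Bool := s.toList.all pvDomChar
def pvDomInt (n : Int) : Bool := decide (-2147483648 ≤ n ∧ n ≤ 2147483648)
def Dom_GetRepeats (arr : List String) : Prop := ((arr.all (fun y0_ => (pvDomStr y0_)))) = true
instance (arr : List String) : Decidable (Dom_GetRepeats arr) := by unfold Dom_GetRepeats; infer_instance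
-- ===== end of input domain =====

-- B replaces A's incrementing hash-dict pass by an iterative partition: the head's count is the
-- length drop when its occurrences are filtered out, looping on the remainder (objective: alternative).

-- ===== PORT A =====
def GetRepeats (arr : List String) : List Int :=
  (arr.foldl (fun r l =>
      if r.contains l then r.modify l 0 (· + 1) else r.insert l 1)
    PySem.Dict.empty).values

-- ===== PORT B =====
-- the while loop: peel off the head's occurrences, append its count, continue on the rest
def GetRepeatsAltGo : List String → List Int → List Int
  | [], out => out
  | x :: xs, out =>
    let rest := xs.filter (fun y => y != x)
    GetRepeatsAltGo rest (out ++ [((x :: xs).length : Int) - (rest.length : Int)])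
termination_by l _ => l.length
decreasing_by
  simpa [rest] using Nat.lt_succ_of_le (List.length_filter_le _ xs)

def GetRepeats_alt (arr : List String) : List Int := GetRepeatsAltGo arr []

-- ===== PRECONDITION & SPEC =====
def Spec_GetRepeats (arr : List String) (out : List Int) : Prop := out = GetRepeats_alt arr
instance (arr : List String) (out : List Int) : Decidable (Spec_GetRepeats arr out) := by unfold Spec_GetRepeats; infer_instance

-- ===== CLAIM (what is proved, stated in full; the proofs are below) =====
def Claim_equal_GetRepeats : Prop := ∀ (arr : List String), Dom_GetRepeats arr → Spec_GetRepeats arr (GetRepeats arr)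

-- ===== LEMMAS AND PROOFS =====

-- A's loop step (increment if present, else install 1) is exactly Counter's modify step.
theorem stepA_eq_modify (r : PySem.Dict String Int) (l : String) :
    (if r.contains l then r.modify l 0 (· + 1) else r.insert l 1) = r.modify l 0 (· + 1) := by
  by_cases h : r.contains l = true
  · simp [h]
  · simp [h, PySem.Dict.modify, PySem.Dict.getD,
      (PySem.Dict.get?_eq_none_iff_contains r l).mpr (by simpa using h)]

theorem GetRepeats_eq_counter_values (arr : List String) :
    GetRepeats arr = (PySem.Dict.counter arr).values := by
  unfold GetRepeats
  rw [PySem.Dict.counter_eq_foldl]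
  congr 1
  exact List.foldl_ext _ _ _ (fun d x _ => stepA_eq_modify d x)

-- accumulator lemmas about PySem.Set.add folds (= dedup's fold)
theorem add_of_mem (s : PySem.Set String) (y : String) (h : y ∈ s) :
    PySem.Set.add s y = s := by
  unfold PySem.Set.add
  rw [if_pos (by simpa using h)]

theorem mem_add_of_mem (s : PySem.Set String) (y x : String) (h : x ∈ s) :
    x ∈ PySem.Set.add s y := by
  unfold PySem.Set.add
  split
  · exact h
  · simp [h]

theorem foldl_add_filter_ne (x : String) :
    ∀ (xs : List String) (s : PySem.Set String), x ∈ s →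
      xs.foldl PySem.Set.add s = (xs.filter (fun y => y != x)).foldl PySem.Set.add s := by
  intro xs
  induction xs with
  | nil => intro s _; rfl
  | cons y ys ih =>
    intro s hx
    by_cases hyx : y = x
    · subst hyx
      have h2 : List.filter (fun z => z != y) (y :: ys) = List.filter (fun z => z != y) ys := by
        simp
      rw [List.foldl_cons, add_of_mem s y hx, h2]
      exact ih s hx
    · have h2 : List.filter (fun z => z != x) (y :: ys)
          = y :: List.filter (fun z => z != x) ys := by
        simp [hyx]
      rw [h2, List.foldl_cons, List.foldl_cons]
      exact ih (PySem.Set.add s y) (mem_add_of_mem s y x hx)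

theorem foldl_add_cons_of_not_mem (x : String) :
    ∀ (l : List String) (s : PySem.Set String), x ∉ l →
      l.foldl PySem.Set.add (x :: s) = x :: l.foldl PySem.Set.add s := by
  intro l
  induction l with
  | nil => intro s _; rfl
  | cons y ys ih =>
    intro s hx
    have hyx : y ≠ x := fun h => hx (by simp [h])
    have hstep : PySem.Set.add (x :: s) y = x :: PySem.Set.add s y := by
      by_cases h : y ∈ s <;> simp [PySem.Set.add, h, hyx]
    rw [List.foldl_cons, hstep, List.foldl_cons]
    exact ih _ (fun h => hx (by simp [h]))

-- dedup of a cons: head first, then dedup of the tail with the head's occurrences removed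
theorem dedup_cons_filter (x : String) (xs : List String) :
    PySem.List.dedup (x :: xs) =
      x :: PySem.List.dedup (xs.filter (fun y => y != x)) := by
  have h1 : PySem.List.dedup (x :: xs) = xs.foldl PySem.Set.add [x] := by
    simp [PySem.List.dedup, PySem.Set.ofList, PySem.Set.empty, PySem.Set.add]
  have hx : x ∉ xs.filter (fun y => y != x) := by
    intro h
    have := List.of_mem_filter h
    simp at this
  rw [h1, foldl_add_filter_ne x xs [x] (by simp),
      foldl_add_cons_of_not_mem x _ [] hx]
  rfl

-- the length drop of the filter is exactly the removed element's count
theorem length_filter_add_count (xs : List String) (x : String) :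
    (xs.filter (fun y => y != x)).length + xs.count x = xs.length := by
  induction xs with
  | nil => simp
  | cons z zs ih =>
    by_cases h : z = x <;> simp [h] <;> omega

-- counts are preserved by removing the other element's occurrences
theorem count_filter_ne (y x : String) (hyx : y ≠ x) (xs : List String) :
    (xs.filter (fun z => z != x)).count y = xs.count y := by
  rw [List.count_filter]
  · simpa using hyx

-- the loop's invariant: it appends the dedup-ordered counts of what is left
theorem go_eq_append_map_count :
    ∀ (l : List String) (out : List Int),
      GetRepeatsAltGo l out = out ++ (PySem.List.dedup l).map (fun y => (l.count y : Int)) := by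
  intro l
  induction hn : l.length using Nat.strong_induction_on generalizing l with
  | _ n ih =>
    match l with
    | [] => intro out; simp [GetRepeatsAltGo]
    | x :: xs =>
      intro out
      have hrl : (xs.filter (fun y => y != x)).length < n := by
        subst hn
        simpa using Nat.lt_succ_of_le (List.length_filter_le _ xs)
      have ihr := ih _ hrl (xs.filter (fun y => y != x)) rfl
      rw [GetRepeatsAltGo, dedup_cons_filter]
      simp only [List.map_cons, ihr, List.append_assoc, List.singleton_append]
      congr 1
      rw [List.cons_eq_cons]
      constructor
      · -- head: count of x equals the length drop
        have hsplit := length_filter_add_count xs x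
        simp only [List.count_cons_self, List.length_cons]
        push_cast
        omega
      · -- tail: counts unchanged after removing x's occurrences
        apply List.map_congr_left
        intro y hy
        have hyx : y ≠ x := by
          have hmem : y ∈ xs.filter (fun z => z != x) :=
            (PySem.List.mem_dedup _ _).mp hy
          have := List.of_mem_filter hmem
          simpa using this
        rw [count_filter_ne y x hyx xs]
        simp [Ne.symm hyx]

-- B computes dedup-ordered counts
theorem GetRepeats_alt_eq_map_count (l : List String) :
    GetRepeats_alt l = (PySem.List.dedup l).map (fun y => (l.count y : Int)) := by
  simpa [GetRepeats_alt] using go_eq_append_map_count l []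

-- ===== VERDICT (by name: the statement is the Claim_ definition above) =====
theorem GetRepeats_spec : Claim_equal_GetRepeats := by
  intro arr _
  show GetRepeats arr = GetRepeats_alt arr
  rw [GetRepeats_eq_counter_values, GetRepeats_alt_eq_map_count]
  have h := congrArg (List.map (·.2)) (PySem.Dict.items_counter (κ := String) arr)
  simpa [PySem.Dict.values, List.map_map, Function.comp] using h
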